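-- pv_equiv track=rewrite | github.com/dehui333/BioDataProcessing | regions.py | infer_query_info
-- ===== SOURCE A (Python) =====
-- CODE_M = 0
--
-- CODE_I = 1
--
-- CODE_S = 4
--
-- CODE_H = 5
--
-- def infer_query_info(cigar_pairs):
--     q_len = 0
--     seen_M = False
--     left_clip = 0
--     right_clip = 0
--     for op, num in cigar_pairs:
--         if op == CODE_M:
--             q_len += num
--             seen_M = True
--         elif op == CODE_I:
--             q_len += num
--         elif op == CODE_S or op == CODE_H:
--             q_len += num
--             if seen_M:
--                 right_clip += num
--             else:
--                 left_clip += num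
--
--     q_end = q_len - right_clip
--     q_start = left_clip
--
--     return q_start, q_end, q_len
-- ===== SOURCE B (Python) =====
-- CODE_M = 0
--
-- CODE_I = 1
--
-- CODE_S = 4
--
-- CODE_H = 5
--
-- def infer_query_info(cigar_pairs):
--     q_len = sum(num for op, num in cigar_pairs if op in (CODE_M, CODE_I, CODE_S, CODE_H))
--     total_clip = sum(num for op, num in cigar_pairs if op in (CODE_S, CODE_H))
--     left_clip = 0
--     for op, num in cigar_pairs:
--         if op == CODE_M:
--             break
--         if op in (CODE_S, CODE_H):
--             left_clip += num
--     right_clip = total_clip - left_clip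
--     return left_clip, q_len - right_clip, q_len
-- ===== Notes on version B (the rewrite author's own statement) =====
-- stated objective: alternative
-- what changed: Replaces the single branchy stateful loop (seen_M flag, four accumulators) with three separate shape-different passes: a comprehension sum for q_len, a comprehension sum for total clip, and a short prefix scan (stopping at the first M) for left_clip, with right_clip recovered algebraically as total_clip - left_clip.
import Mathlib
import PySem

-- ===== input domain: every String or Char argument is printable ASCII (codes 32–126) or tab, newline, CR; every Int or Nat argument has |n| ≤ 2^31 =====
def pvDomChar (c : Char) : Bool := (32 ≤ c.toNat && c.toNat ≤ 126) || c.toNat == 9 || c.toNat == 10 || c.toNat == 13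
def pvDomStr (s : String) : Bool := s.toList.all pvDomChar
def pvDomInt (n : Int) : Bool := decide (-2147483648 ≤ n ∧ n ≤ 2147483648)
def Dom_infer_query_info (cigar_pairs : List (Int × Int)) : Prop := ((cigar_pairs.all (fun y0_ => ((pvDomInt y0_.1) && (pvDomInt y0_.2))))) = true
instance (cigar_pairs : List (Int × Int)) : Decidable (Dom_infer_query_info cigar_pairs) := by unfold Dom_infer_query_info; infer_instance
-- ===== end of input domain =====

-- B replaces A's single stateful loop with two comprehension sums plus a prefix scan and an algebraic identity (alternative decomposition, same cost).


-- ===== PORT A =====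
-- A's for-loop over (op,num) with state (q_len, seen_M, left_clip, right_clip), branches in source order.
def inferLoopA : List (Int × Int) → Int → Bool → Int → Int → Int × Bool × Int × Int
  | [], q_len, seen_M, left_clip, right_clip => (q_len, seen_M, left_clip, right_clip)
  | (op, num) :: rest, q_len, seen_M, left_clip, right_clip =>
    if op == 0 then inferLoopA rest (q_len + num) true left_clip right_clip
    else if op == 1 then inferLoopA rest (q_len + num) seen_M left_clip right_clip
    else if op == 4 || op == 5 then
      if seen_M then inferLoopA rest (q_len + num) seen_M left_clip (right_clip + num)
      else inferLoopA rest (q_len + num) seen_M (left_clip + num) right_clip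
    else inferLoopA rest q_len seen_M left_clip right_clip

def infer_query_info (cigar_pairs : List (Int × Int)) : Int × Int × Int :=
  let st := inferLoopA cigar_pairs 0 false 0 0
  let q_len := st.1
  let left_clip := st.2.2.1
  let right_clip := st.2.2.2
  (left_clip, q_len - right_clip, q_len)

-- ===== PORT B =====
-- comprehension sums (filter + map + sum) and the prefix scan with break.
def qLenB (cigar_pairs : List (Int × Int)) : Int :=
  ((cigar_pairs.filter (fun p => p.1 == 0 || p.1 == 1 || p.1 == 4 || p.1 == 5)).map Prod.snd).sum

def totalClipB (cigar_pairs : List (Int × Int)) : Int :=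
  ((cigar_pairs.filter (fun p => p.1 == 4 || p.1 == 5)).map Prod.snd).sum

def leftClipB : List (Int × Int) → Int
  | [] => 0
  | (op, num) :: rest =>
    if op == 0 then 0
    else if op == 4 || op == 5 then num + leftClipB rest
    else leftClipB rest

def infer_query_info_alt (cigar_pairs : List (Int × Int)) : Int × Int × Int :=
  let q_len := qLenB cigar_pairs
  let left_clip := leftClipB cigar_pairs
  let right_clip := totalClipB cigar_pairs - left_clip
  (left_clip, q_len - right_clip, q_len)

-- ===== PRECONDITION & SPEC =====
def Spec_infer_query_info (cigar_pairs : List (Int × Int)) (out : Int × Int × Int) : Prop := out = infer_query_info_alt cigar_pairs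
instance (cigar_pairs : List (Int × Int)) (out : Int × Int × Int) : Decidable (Spec_infer_query_info cigar_pairs out) := by unfold Spec_infer_query_info; infer_instance

-- ===== CLAIM (what is proved, stated in full; the proofs are below) =====
def Claim_equal_infer_query_info : Prop := ∀ (cigar_pairs : List (Int × Int)), Dom_infer_query_info cigar_pairs → Spec_infer_query_info cigar_pairs (infer_query_info cigar_pairs)

-- ===== LEMMAS AND PROOFS =====
theorem qLenB_cons (op num : Int) (rest : List (Int × Int)) :
    qLenB ((op, num) :: rest) = (if op == 0 || op == 1 || op == 4 || op == 5 then num else 0) + qLenB rest := by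
  simp only [qLenB, List.filter_cons]
  by_cases h : (op == 0 || op == 1 || op == 4 || op == 5) = true <;> simp [h]

theorem totalClipB_cons (op num : Int) (rest : List (Int × Int)) :
    totalClipB ((op, num) :: rest) = (if op == 4 || op == 5 then num else 0) + totalClipB rest := by
  simp only [totalClipB, List.filter_cons]
  by_cases h : (op == 4 || op == 5) = true <;> simp [h]

-- Once an M has been seen, every later clip goes right: the loop adds qLenB to q_len and totalClipB to right_clip.
theorem inferLoopA_true (xs : List (Int × Int)) (q l r : Int) :
    inferLoopA xs q true l r = (q + qLenB xs, true, l, r + totalClipB xs) := by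
  induction xs generalizing q r with
  | nil => simp [inferLoopA, qLenB, totalClipB]
  | cons p rest ih =>
    obtain ⟨op, num⟩ := p
    rw [qLenB_cons, totalClipB_cons]
    by_cases h0 : op = 0
    · subst h0; rw [show inferLoopA ((0,num)::rest) q true l r = inferLoopA rest (q+num) true l r from rfl, ih]
      simp [Prod.ext_iff]; ring
    · by_cases h1 : op = 1
      · subst h1; rw [show inferLoopA ((1,num)::rest) q true l r = inferLoopA rest (q+num) true l r from rfl, ih]
        simp [Prod.ext_iff]; ring
      · by_cases h4 : (op == 4 || op == 5) = true
        · have hb : (op == 0 || op == 1 || op == 4 || op == 5) = true := by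
            rcases (by simpa using h4 : op = 4 ∨ op = 5) with h | h <;> simp [h]
          have : inferLoopA ((op,num)::rest) q true l r = inferLoopA rest (q+num) true l (r+num) := by
            simp [inferLoopA, h0, h1, h4]
          rw [this, ih, if_pos hb, if_pos h4]
          exact Prod.ext (by ring) (Prod.ext rfl (Prod.ext rfl (by ring)))
        · have h4' : ¬(op = 4 ∨ op = 5) := by simpa using h4
          have : inferLoopA ((op,num)::rest) q true l r = inferLoopA rest q true l r := by
            simp [inferLoopA, h0, h1]
            intro h; simp [h] at h4
          rw [this, ih]
          simp [h0, h1, h4']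

-- Before the first M the loop accumulates left_clip = leftClipB; at the first M it switches to the seen_M regime.
theorem inferLoopA_false (xs : List (Int × Int)) (q l r : Int) :
    (inferLoopA xs q false l r).1 = q + qLenB xs ∧
    (inferLoopA xs q false l r).2.2.1 = l + leftClipB xs ∧
    (inferLoopA xs q false l r).2.2.2 = r + (totalClipB xs - leftClipB xs) := by
  induction xs generalizing q l r with
  | nil => simp [inferLoopA, qLenB, totalClipB, leftClipB]
  | cons p rest ih =>
    obtain ⟨op, num⟩ := p
    rw [qLenB_cons, totalClipB_cons]
    by_cases h0 : op = 0
    · subst h0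
      rw [show inferLoopA ((0,num)::rest) q false l r = inferLoopA rest (q+num) true l r from rfl,
        inferLoopA_true]
      simp [leftClipB]; ring
    · by_cases h1 : op = 1
      · subst h1
        rw [show inferLoopA ((1,num)::rest) q false l r = inferLoopA rest (q+num) false l r from rfl]
        obtain ⟨e1, e2, e3⟩ := ih (q + num) l r
        rw [e1, e2, e3]
        simp [leftClipB]; ring
      · by_cases h4 : (op == 4 || op == 5) = true
        · have hb : (op == 0 || op == 1 || op == 4 || op == 5) = true := by
            rcases (by simpa using h4 : op = 4 ∨ op = 5) with h | h <;> simp [h]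
          have heq : inferLoopA ((op,num)::rest) q false l r = inferLoopA rest (q+num) false (l+num) r := by
            simp [inferLoopA, h0, h1, h4]
          have hlc : leftClipB ((op,num)::rest) = num + leftClipB rest := by
            simp [leftClipB, h0, h4]
          rw [heq, hlc]
          obtain ⟨e1, e2, e3⟩ := ih (q + num) (l + num) r
          rw [e1, e2, e3, if_pos hb, if_pos h4]
          refine ⟨by ring, by ring, by ring⟩
        · have h4' : ¬(op = 4 ∨ op = 5) := by simpa using h4
          have heq : inferLoopA ((op,num)::rest) q false l r = inferLoopA rest q false l r := by
            simp [inferLoopA, h0, h1]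
            intro h; simp [h] at h4
          have hlc : leftClipB ((op,num)::rest) = leftClipB rest := by
            simp [leftClipB, h0, h4]
          rw [heq, hlc]
          obtain ⟨e1, e2, e3⟩ := ih q l r
          rw [e1, e2, e3]
          simp [h0, h1, h4']

-- ===== VERDICT (by name: the statement is the Claim_ definition above) =====
theorem infer_query_info_spec : Claim_equal_infer_query_info := by
  intro cigar_pairs _
  unfold Spec_infer_query_info infer_query_info infer_query_info_alt
  obtain ⟨e1, e2, e3⟩ := inferLoopA_false cigar_pairs 0 0 0
  simp only [e1, e2, e3]
  refine Prod.ext (by ring) (Prod.ext (by ring) (by ring))
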